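-- pv_equiv track=rewrite | github.com/mananthavelu/data_structures_and_algorithms_using_python | Basic algorithms/sorting_algorithms/1. bubble_sort_hrs_mins.py | sort_hour_minutes
-- ===== SOURCE A (Python) =====
-- def sort_hour_minutes(input_array):
--     for count in range(len(input_array)):
--         for index in range(len(input_array) - 1):
--             current_hour, current_min = input_array[index]
--             next_hour, next_min = input_array[index + 1]
--             if current_hour < next_hour or (current_hour == next_hour and current_min < next_min):
--                 continue
--             input_array[index] = next_hour, next_min
--             input_array[index + 1] = current_hour, current_min
--     return input_array
-- ===== SOURCE B (Python) =====
-- def _insert(pair, lst):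
--     # insert pair into already-sorted lst (lex order): copy the prefix of
--     # elements <= pair, then pair, then the rest
--     out = []
--     i = 0
--     while i < len(lst) and lst[i] <= pair:
--         out.append(lst[i])
--         i += 1
--     return out + [pair] + lst[i:]
--
--
-- def sort_hour_minutes(input_array):
--     result = []
--     for pair in input_array:
--         result = _insert(pair, result)
--     input_array[:] = result
--     return input_array
-- ===== Notes on version B (the rewrite author's own statement) =====
-- stated objective: faster
-- what changed: Replaced A's unconditional n*(n-1) bubble-sort passes over the whole list by an insertion sort that inserts each element into a growing sorted list (then written back in place), doing work proportional to the number of inversions instead of always n^2 comparisons.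
import Mathlib
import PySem

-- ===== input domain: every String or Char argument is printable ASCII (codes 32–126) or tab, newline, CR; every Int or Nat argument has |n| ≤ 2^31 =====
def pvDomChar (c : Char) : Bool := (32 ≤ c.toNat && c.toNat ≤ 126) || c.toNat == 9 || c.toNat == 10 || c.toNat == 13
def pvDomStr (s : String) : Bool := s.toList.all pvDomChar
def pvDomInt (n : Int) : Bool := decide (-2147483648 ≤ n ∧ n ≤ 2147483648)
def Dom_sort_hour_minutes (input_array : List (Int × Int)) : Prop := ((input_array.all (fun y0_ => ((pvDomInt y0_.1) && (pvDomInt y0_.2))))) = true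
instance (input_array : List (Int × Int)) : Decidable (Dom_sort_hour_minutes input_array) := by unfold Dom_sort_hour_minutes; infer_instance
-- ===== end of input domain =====

-- B replaces A's fixed n*(n-1) bubble passes by an insertion sort growing a sorted prefix
-- (objective: faster by a constant factor; both mutate the list in place and return the
-- same object, so the proved equivalence is about the return value).


-- ===== PORT A =====
-- one step of the inner loop: read arr[index] and arr[index+1], swap them unless strictly ordered
def pvStepA (arr : List (Int × Int)) (index : Int) : List (Int × Int) :=
  let c := PySem.List.pyGetD arr index (0, 0)
  let n := PySem.List.pyGetD arr (index + 1) (0, 0)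
  if c.1 < n.1 ∨ (c.1 = n.1 ∧ c.2 < n.2) then arr
  else PySem.List.pySetD (PySem.List.pySetD arr index n) (index + 1) c

-- the inner 'for index in range(len(input_array) - 1)' loop
def pvInnerA (arr : List (Int × Int)) : List (Int × Int) :=
  (PySem.List.pyRange 0 ((arr.length : Int) - 1) 1).foldl pvStepA arr

def sort_hour_minutes (input_array : List (Int × Int)) : List (Int × Int) :=
  (PySem.List.pyRange 0 (input_array.length : Int) 1).foldl (fun arr _count => pvInnerA arr) input_array

-- ===== PORT B =====
-- _insert: keep the prefix of elements <= pair (lex), then pair, then the rest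
def pvInsertB (pair : Int × Int) : List (Int × Int) → List (Int × Int)
  | [] => [pair]
  | q :: rest =>
      if q.1 < pair.1 ∨ (q.1 = pair.1 ∧ q.2 ≤ pair.2) then q :: pvInsertB pair rest
      else pair :: q :: rest

def sort_hour_minutes_alt (input_array : List (Int × Int)) : List (Int × Int) :=
  input_array.foldl (fun result pair => pvInsertB pair result) []

-- ===== PRECONDITION & SPEC =====
def Spec_sort_hour_minutes (input_array : List (Int × Int)) (out : List (Int × Int)) : Prop := out = sort_hour_minutes_alt input_array
instance (input_array : List (Int × Int)) (out : List (Int × Int)) : Decidable (Spec_sort_hour_minutes input_array out) := by unfold Spec_sort_hour_minutes; infer_instance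

-- ===== CLAIM (what is proved, stated in full; the proofs are below) =====
def Claim_equal_sort_hour_minutes : Prop := ∀ (input_array : List (Int × Int)), Dom_sort_hour_minutes input_array → Spec_sort_hour_minutes input_array (sort_hour_minutes input_array)

-- ===== LEMMAS AND PROOFS =====

-- the non-strict / strict lexicographic order on (hour, minute) pairs
def pvLe (a b : Int × Int) : Prop := a.1 < b.1 ∨ (a.1 = b.1 ∧ a.2 ≤ b.2)
def pvLt (a b : Int × Int) : Prop := a.1 < b.1 ∨ (a.1 = b.1 ∧ a.2 < b.2)

lemma pvLe_trans {a b c : Int × Int} (h1 : pvLe a b) (h2 : pvLe b c) : pvLe a c := by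
  unfold pvLe at *; omega

lemma pvLe_antisymm {a b : Int × Int} (h1 : pvLe a b) (h2 : pvLe b a) : a = b := by
  unfold pvLe at *; obtain ⟨x, y⟩ := a; obtain ⟨u, v⟩ := b
  simp only [Prod.mk.injEq]; omega

lemma pvLe_of_not_lt {a b : Int × Int} (h : ¬ pvLt a b) : pvLe b a := by
  unfold pvLt at h; unfold pvLe; omega

lemma pvLe_of_lt {a b : Int × Int} (h : pvLt a b) : pvLe a b := by
  unfold pvLt at h; unfold pvLe; omega

-- structural form of A's inner pass
def pvBPass : List (Int × Int) → List (Int × Int)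
  | [] => []
  | [a] => [a]
  | a :: b :: t =>
      if a.1 < b.1 ∨ (a.1 = b.1 ∧ a.2 < b.2) then a :: pvBPass (b :: t) else b :: pvBPass (a :: t)

-- ---- pvInnerA equals pvBPass ----

lemma pvGetD_shift (c : Int × Int) (ys : List (Int × Int)) (i : Int) (hi : 1 ≤ i) :
    PySem.List.pyGetD (c :: ys) i (0,0) = PySem.List.pyGetD ys (i - 1) (0,0) := by
  rw [PySem.List.pyGetD_of_nonneg _ _ (by omega : (0:Int) ≤ i),
      PySem.List.pyGetD_of_nonneg _ _ (by omega : (0:Int) ≤ i - 1)]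
  rw [show i.toNat = (i - 1).toNat + 1 by omega, List.getD_cons_succ]

lemma pvSetD_shift (c : Int × Int) (ys : List (Int × Int)) (i : Int) (v : Int × Int) (hi : 1 ≤ i) :
    PySem.List.pySetD (c :: ys) i v = c :: PySem.List.pySetD ys (i - 1) v := by
  rw [PySem.List.pySetD_of_nonneg _ _ (by omega : (0:Int) ≤ i),
      PySem.List.pySetD_of_nonneg _ _ (by omega : (0:Int) ≤ i - 1)]
  rw [show i.toNat = (i - 1).toNat + 1 by omega, List.set_cons_succ]

lemma pvStepA_shift (c : Int × Int) (ys : List (Int × Int)) (i : Int) (hi : 1 ≤ i) :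
    pvStepA (c :: ys) i = c :: pvStepA ys (i - 1) := by
  unfold pvStepA
  simp only [pvGetD_shift c ys i hi, pvGetD_shift c ys (i+1) (by omega),
    show i + 1 - 1 = i - 1 + 1 by omega]
  split
  · rfl
  · rw [pvSetD_shift c ys i _ hi, pvSetD_shift c _ (i+1) _ (by omega),
        show i + 1 - 1 = i - 1 + 1 by omega]

lemma pvFoldl_shift (n : ℕ) : ∀ (a b : Int) (c : Int × Int) (ys : List (Int × Int)),
    1 ≤ a → (b - a).toNat = n →
    (PySem.List.pyRange a b 1).foldl pvStepA (c :: ys)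
      = c :: (PySem.List.pyRange (a - 1) (b - 1) 1).foldl pvStepA ys := by
  induction n with
  | zero =>
      intro a b c ys ha hn
      rw [PySem.List.pyRange_one_eq_nil (a := a) (b := b) (by omega),
          PySem.List.pyRange_one_eq_nil (a := a - 1) (b := b - 1) (by omega)]
      rfl
  | succ k ih =>
      intro a b c ys ha hn
      rw [PySem.List.pyRange_one_cons (a := a) (b := b) (by omega),
          PySem.List.pyRange_one_cons (a := a - 1) (b := b - 1) (by omega)]
      simp only [List.foldl_cons]
      rw [pvStepA_shift c ys a ha]
      rw [ih (a + 1) b c (pvStepA ys (a - 1)) (show 1 ≤ a + 1 by omega)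
            (show (b - (a + 1)).toNat = k by omega)]
      rw [show a + 1 - 1 = a - 1 + 1 by omega]

lemma pvInner_eq_bpass_aux (n : ℕ) : ∀ arr : List (Int × Int), arr.length ≤ n →
    (PySem.List.pyRange 0 ((arr.length : Int) - 1) 1).foldl pvStepA arr = pvBPass arr := by
  induction n with
  | zero =>
      intro arr h
      have : arr = [] := by cases arr <;> simp_all
      subst this
      simp only [List.length_nil, Nat.cast_zero, zero_sub]
      rw [PySem.List.pyRange_one_eq_nil (by omega : (-1 : Int) ≤ 0)]
      simp [pvBPass]
  | succ k ih =>
      intro arr h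
      match arr with
      | [] =>
          simp only [List.length_nil, Nat.cast_zero, zero_sub]
          rw [PySem.List.pyRange_one_eq_nil (by omega : (-1 : Int) ≤ 0)]
          simp [pvBPass]
      | [a] =>
          rw [show ((([a] : List (Int × Int)).length : Int) - 1) = 0 by simp,
              PySem.List.pyRange_one_eq_nil (le_refl (0 : Int))]
          simp [pvBPass]
      | a :: b :: t =>
          have hlen : ((a :: b :: t).length : Int) - 1 = (t.length : Int) + 1 := by
            simp
          rw [hlen, PySem.List.pyRange_one_cons (by omega : (0:Int) < (t.length : Int) + 1)]
          simp only [List.foldl_cons]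
          have hstep : pvStepA (a :: b :: t) 0
              = (if a.1 < b.1 ∨ (a.1 = b.1 ∧ a.2 < b.2) then a :: b :: t else b :: a :: t) := by
            unfold pvStepA
            simp only [PySem.List.pyGetD_zero_cons, zero_add,
              pvGetD_shift a (b :: t) 1 (le_refl 1), show (1:Int) - 1 = 0 from rfl,
              PySem.List.pyGetD_zero_cons]
            split
            · rfl
            · rw [PySem.List.pySetD_of_nonneg _ _ (le_refl (0:Int)),
                  PySem.List.pySetD_of_nonneg _ _ (show (0:Int) ≤ 1 by omega)]
              rfl
          rw [hstep]
          have hexp : pvBPass (a :: b :: t)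
              = if a.1 < b.1 ∨ (a.1 = b.1 ∧ a.2 < b.2)
                then a :: pvBPass (b :: t) else b :: pvBPass (a :: t) := by
            rw [pvBPass.eq_3]
          by_cases hab : a.1 < b.1 ∨ (a.1 = b.1 ∧ a.2 < b.2)
          · rw [if_pos hab]
            rw [show (0:Int) + 1 = 1 from rfl]
            rw [pvFoldl_shift (t.length) 1 ((t.length : Int) + 1) a (b :: t) (le_refl 1) (by omega)]
            rw [show ((1:Int) - 1) = 0 from rfl,
                show ((t.length : Int) + 1 - 1) = (((b :: t).length : Int) - 1) by simp]
            rw [ih (b :: t) (by simpa using Nat.le_of_succ_le_succ h)]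
            rw [hexp, if_pos hab]
          · rw [if_neg hab]
            rw [show (0:Int) + 1 = 1 from rfl]
            rw [pvFoldl_shift (t.length) 1 ((t.length : Int) + 1) b (a :: t) (le_refl 1) (by omega)]
            rw [show ((1:Int) - 1) = 0 from rfl,
                show ((t.length : Int) + 1 - 1) = (((a :: t).length : Int) - 1) by simp]
            rw [ih (a :: t) (by simpa using Nat.le_of_succ_le_succ h)]
            rw [hexp, if_neg hab]

lemma pvInner_eq_bpass (arr : List (Int × Int)) : pvInnerA arr = pvBPass arr :=
  pvInner_eq_bpass_aux arr.length arr le_rfl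

-- ---- properties of pvBPass ----

lemma pvBPass_perm (l : List (Int × Int)) : (pvBPass l).Perm l := by
  fun_induction pvBPass with
  | case1 => simp
  | case2 a => simp
  | case3 a b t h ih => exact List.Perm.cons a ih
  | case4 a b t h ih => exact (List.Perm.cons b ih).trans (List.Perm.swap a b t)

lemma pvBPass_max (l : List (Int × Int)) (hne : l ≠ []) :
    ∃ l' m, pvBPass l = l' ++ [m] ∧ ∀ x ∈ l, pvLe x m := by
  fun_induction pvBPass with
  | case1 => exact absurd rfl hne
  | case2 a => exact ⟨[], a, rfl, by simp [pvLe]⟩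
  | case3 a b t h ih =>
      obtain ⟨l', m, he, hm⟩ := ih (by simp)
      refine ⟨a :: l', m, by simp [he], ?_⟩
      intro x hx
      rcases List.mem_cons.mp hx with h1 | h1
      · subst h1
        exact pvLe_trans (pvLe_of_lt (show pvLt x b from h)) (hm b (by simp))
      · exact hm x h1
  | case4 a b t h ih =>
      obtain ⟨l', m, he, hm⟩ := ih (by simp)
      refine ⟨b :: l', m, by simp [he], ?_⟩
      intro x hx
      rcases List.mem_cons.mp hx with h1 | h1
      · subst h1
        exact hm x (by simp)
      · rcases List.mem_cons.mp h1 with h2 | h2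
        · subst h2
          exact pvLe_trans (pvLe_of_not_lt (show ¬ pvLt a x from h)) (hm a (by simp))
        · exact hm x (by simp [h2])

lemma pvBPass_append_max (l : List (Int × Int)) (m : Int × Int)
    (hm : ∀ x ∈ l, pvLe x m) : pvBPass (l ++ [m]) = pvBPass l ++ [m] := by
  fun_induction pvBPass l with
  | case1 => simp [pvBPass]
  | case2 a =>
      have hma : ¬ pvLt m a := by
        have := hm a (by simp)
        unfold pvLe at this; unfold pvLt; omega
      by_cases ham : pvLt a m
      · have ham' : a.1 < m.1 ∨ (a.1 = m.1 ∧ a.2 < m.2) := ham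
        simp [pvBPass, ham']
      · have heq : a = m := pvLe_antisymm (pvLe_of_not_lt hma) (pvLe_of_not_lt ham)
        subst heq
        simp [pvBPass]
  | case3 a b t h ih =>
      have hh : pvBPass ((a :: b :: t) ++ [m]) = a :: pvBPass ((b :: t) ++ [m]) := by
        simp only [List.cons_append]; rw [pvBPass.eq_3]; rw [if_pos h]
      rw [hh, ih (fun x hx => hm x (by simp_all))]
      rfl
  | case4 a b t h ih =>
      have hh : pvBPass ((a :: b :: t) ++ [m]) = b :: pvBPass ((a :: t) ++ [m]) := by
        simp only [List.cons_append]; rw [pvBPass.eq_3]; rw [if_neg h]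
      rw [hh, ih ?_]
      · rfl
      · intro x hx
        apply hm
        rcases List.mem_cons.mp hx with h1 | h1 <;> simp_all

lemma pvBPass_iterate_perm (n : ℕ) (l : List (Int × Int)) : (pvBPass^[n] l).Perm l := by
  induction n generalizing l with
  | zero => simp
  | succ k ih =>
      rw [Function.iterate_succ_apply]
      exact (ih (pvBPass l)).trans (pvBPass_perm l)

lemma pvBPass_iterate_append_max (n : ℕ) (l : List (Int × Int)) (m : Int × Int)
    (hm : ∀ x ∈ l, pvLe x m) : pvBPass^[n] (l ++ [m]) = pvBPass^[n] l ++ [m] := by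
  induction n generalizing l with
  | zero => simp
  | succ k ih =>
      rw [Function.iterate_succ_apply, Function.iterate_succ_apply]
      rw [pvBPass_append_max l m hm]
      exact ih (pvBPass l) (fun x hx => hm x ((pvBPass_perm l).mem_iff.mp hx))

lemma pvBPass_iterate_sorted (n : ℕ) : ∀ l : List (Int × Int), l.length ≤ n →
    (pvBPass^[n] l).Pairwise pvLe := by
  induction n with
  | zero =>
      intro l h
      have : l = [] := by cases l <;> simp_all
      subst this; simp
  | succ k ih =>
      intro l h
      rcases eq_or_ne l [] with hl | hl
      · subst hl
        rw [Function.iterate_fixed (show pvBPass [] = [] by simp [pvBPass])]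
        simp
      rw [Function.iterate_succ_apply]
      obtain ⟨l', m, he, hm⟩ := pvBPass_max l hl
      rw [he]
      have hlen : l'.length ≤ k := by
        have h1 : (pvBPass l).length = l.length := (pvBPass_perm l).length_eq
        rw [he] at h1; simp at h1; omega
      have hm' : ∀ x ∈ l', pvLe x m := by
        intro x hx
        apply hm
        exact (pvBPass_perm l).mem_iff.mp (by rw [he]; simp [hx])
      rw [pvBPass_iterate_append_max k l' m hm']
      rw [List.pairwise_append]
      refine ⟨ih l' hlen, by simp, ?_⟩
      intro x hx y hy
      simp at hy; subst hy
      exact hm' x ((pvBPass_iterate_perm k l').mem_iff.mp hx)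

-- ---- A's port: permutation and sortedness ----

lemma pvFoldl_const_iterate (lst : List Int) (arr : List (Int × Int)) :
    lst.foldl (fun a _ => pvBPass a) arr = pvBPass^[lst.length] arr := by
  induction lst generalizing arr with
  | nil => simp
  | cons x xs ih =>
      simp only [List.foldl_cons, List.length_cons]
      rw [ih (pvBPass arr), ← Function.iterate_succ_apply]

lemma pvA_eq_iterate (l : List (Int × Int)) :
    sort_hour_minutes l = pvBPass^[l.length] l := by
  unfold sort_hour_minutes
  rw [PySem.List.foldl_congr_mem _ _ (fun arr _ => pvBPass arr) l
      (fun acc x _ => by rw [show pvInnerA acc = pvBPass acc from pvInner_eq_bpass acc])]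
  rw [pvFoldl_const_iterate]
  congr 1
  rw [PySem.List.length_pyRange_one]
  omega

lemma pvA_perm (l : List (Int × Int)) : (sort_hour_minutes l).Perm l := by
  rw [pvA_eq_iterate]; exact pvBPass_iterate_perm _ _

lemma pvA_sorted (l : List (Int × Int)) : (sort_hour_minutes l).Pairwise pvLe := by
  rw [pvA_eq_iterate]; exact pvBPass_iterate_sorted _ _ le_rfl

-- ---- B's port: permutation and sortedness ----

lemma pvInsertB_perm (p : Int × Int) (l : List (Int × Int)) :
    (pvInsertB p l).Perm (p :: l) := by
  induction l with
  | nil => simp [pvInsertB]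
  | cons q rest ih =>
      unfold pvInsertB
      split
      · exact (List.Perm.cons q ih).trans (List.Perm.swap p q rest)
      · exact List.Perm.refl _

lemma pvInsertB_mem {x p : Int × Int} {l : List (Int × Int)} (hx : x ∈ pvInsertB p l) :
    x = p ∨ x ∈ l := by
  have := (pvInsertB_perm p l).mem_iff.mp hx
  simpa using this

lemma pvInsertB_sorted (p : Int × Int) (l : List (Int × Int)) (hl : l.Pairwise pvLe) :
    (pvInsertB p l).Pairwise pvLe := by
  induction l with
  | nil => simp [pvInsertB]
  | cons q rest ih =>
      unfold pvInsertB
      rw [List.pairwise_cons] at hl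
      split
      · rename_i hq
        rw [List.pairwise_cons]
        constructor
        · intro x hx
          rcases pvInsertB_mem hx with h1 | h1
          · subst h1; exact hq
          · exact hl.1 x h1
        · exact ih hl.2
      · rename_i hq
        rw [List.pairwise_cons]
        refine ⟨?_, List.Pairwise.cons hl.1 hl.2⟩
        intro x hx
        rcases List.mem_cons.mp hx with h1 | h1
        · subst h1
          unfold pvLe; push Not at hq; omega
        · have hqx : pvLe q x := hl.1 x h1
          have hpq : pvLe p q := by unfold pvLe; push Not at hq; omega
          exact pvLe_trans hpq hqx

lemma pvB_foldl_perm (l : List (Int × Int)) : ∀ acc : List (Int × Int),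
    (l.foldl (fun result pair => pvInsertB pair result) acc).Perm (l ++ acc) := by
  induction l with
  | nil => intro acc; simp
  | cons p rest ih =>
      intro acc
      simp only [List.foldl_cons]
      refine (ih (pvInsertB p acc)).trans ?_
      refine (List.Perm.append_left rest (pvInsertB_perm p acc)).trans ?_
      exact List.perm_middle

lemma pvB_perm (l : List (Int × Int)) : (sort_hour_minutes_alt l).Perm l := by
  unfold sort_hour_minutes_alt
  have := pvB_foldl_perm l []
  simpa using this

lemma pvB_sorted (l : List (Int × Int)) : (sort_hour_minutes_alt l).Pairwise pvLe := by
  unfold sort_hour_minutes_alt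
  have haux : ∀ acc : List (Int × Int), acc.Pairwise pvLe →
      (l.foldl (fun result pair => pvInsertB pair result) acc).Pairwise pvLe := by
    induction l with
    | nil => intro acc h; simpa using h
    | cons p rest ih =>
        intro acc h
        simp only [List.foldl_cons]
        exact ih (pvInsertB p acc) (pvInsertB_sorted p acc h)
  exact haux [] (by simp)

-- ===== VERDICT (by name: the statement is the Claim_ definition above) =====
theorem sort_hour_minutes_spec : Claim_equal_sort_hour_minutes := by
  intro l _
  unfold Spec_sort_hour_minutes
  exact List.Perm.eq_of_pairwise (le := pvLe)
    (fun _ _ _ _ h1 h2 => pvLe_antisymm h1 h2)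
    (pvA_sorted l) (pvB_sorted l) ((pvA_perm l).trans (pvB_perm l).symm)
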